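-- pv_equiv track=rewrite | github.com/mattraghu/Spring2024 | IntroToSoftware/Exams/Exam3/TermExam2_MatthewRaghunandan_Question3.py | web_analyzer
-- ===== SOURCE A (Python) =====
-- def web_analyzer(weblogs):
--     webpages = {}
--     for log in weblogs:
--         if not log[1] in webpages:
--             webpages[log[1]] = set([ log[0] ])
--             continue
--         webpages[log[1]].add(log[0])
--
--     return sorted([(k, sorted(list(v))) for k, v in webpages.items()])
-- ===== SOURCE B (Python) =====
-- def web_analyzer(weblogs):
--     pages = sorted({p for _, p in weblogs})
--     return [(p, sorted({u for u, q in weblogs if q == p})) for p in pages]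
-- ===== Notes on version B (the rewrite author's own statement) =====
-- stated objective: simpler
-- what changed: B drops A's incrementally maintained dict of user-sets and final sort of pairs: it sorts the distinct pages once and, for each page, collects that page's users by a direct filter pass over the logs.
import Mathlib
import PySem

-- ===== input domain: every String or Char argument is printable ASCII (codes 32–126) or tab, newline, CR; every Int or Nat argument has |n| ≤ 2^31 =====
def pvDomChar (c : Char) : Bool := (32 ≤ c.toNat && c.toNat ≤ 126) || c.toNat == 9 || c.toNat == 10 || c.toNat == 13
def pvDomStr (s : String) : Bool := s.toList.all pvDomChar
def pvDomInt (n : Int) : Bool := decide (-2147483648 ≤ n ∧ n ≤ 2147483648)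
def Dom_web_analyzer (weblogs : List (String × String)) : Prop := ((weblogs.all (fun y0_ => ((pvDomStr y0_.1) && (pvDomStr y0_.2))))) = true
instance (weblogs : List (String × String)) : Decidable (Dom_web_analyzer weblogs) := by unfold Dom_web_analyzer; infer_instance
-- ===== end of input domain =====

-- B is simpler: no dict of user-sets is maintained — sort the distinct pages once, then collect each page's users by a filter pass.

-- ===== PORT A =====
def web_analyzer (weblogs : List (String × String)) : List (String × List String) :=
  let webpages : PySem.Dict String (PySem.Set String) :=
    weblogs.foldl (fun d log =>
      if !(d.contains log.2) then d.insert log.2 (PySem.Set.ofList [log.1])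
      else d.modify log.2 PySem.Set.empty (fun s => PySem.Set.add s log.1)) PySem.Dict.empty
  PySem.List.sorted2
    (webpages.items.map (fun kv => (kv.1, PySem.List.sorted kv.2 (fun x => x) false)))
    Prod.fst Prod.snd false

-- ===== PORT B =====
def web_analyzer_alt (weblogs : List (String × String)) : List (String × List String) :=
  let pages := PySem.List.sorted (PySem.Set.ofList (weblogs.map (fun l => l.2))) (fun x => x) false
  pages.map (fun p =>
    (p, PySem.List.sorted
          (PySem.Set.ofList ((weblogs.filter (fun l => l.2 == p)).map (fun l => l.1)))
          (fun x => x) false))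

-- ===== PRECONDITION & SPEC =====
def Spec_web_analyzer (weblogs : List (String × String)) (out : List (String × List String)) : Prop := out = web_analyzer_alt weblogs
instance (weblogs : List (String × String)) (out : List (String × List String)) : Decidable (Spec_web_analyzer weblogs out) := by unfold Spec_web_analyzer; infer_instance

-- ===== CLAIM (what is proved, stated in full; the proofs are below) =====
def Claim_equal_web_analyzer : Prop := ∀ (weblogs : List (String × String)), Dom_web_analyzer weblogs → Spec_web_analyzer weblogs (web_analyzer weblogs)

-- ===== LEMMAS AND PROOFS =====

-- A's two loop branches are both `d[log.2] = d.get(log.2, empty set) ∪ {log.1}`.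
theorem pv_body_eq (d : PySem.Dict String (PySem.Set String)) (log : String × String) :
    (if !(d.contains log.2) then d.insert log.2 (PySem.Set.ofList [log.1])
     else d.modify log.2 PySem.Set.empty (fun s => PySem.Set.add s log.1))
    = d.modify log.2 PySem.Set.empty (fun s => PySem.Set.add s log.1) := by
  cases h : d.contains log.2 with
  | true => simp
  | false =>
    have hg : d.get? log.2 = none := by
      have := PySem.Dict.contains_eq_isSome_get? d log.2
      rw [h] at this
      cases hx : d.get? log.2 <;> simp [hx] at this ⊢
    simp [PySem.Dict.modify, PySem.Dict.getD, hg, PySem.Set.ofList, PySem.Set.empty]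

-- the set stored under page c after A's fold = first occurrences of that page's users
theorem pv_getD_fold (l : List (String × String)) :
    ∀ (d : PySem.Dict String (PySem.Set String)) (c : String),
    (l.foldl (fun d log => d.modify log.2 PySem.Set.empty (fun s => PySem.Set.add s log.1)) d).getD c PySem.Set.empty
    = PySem.Set.update (d.getD c PySem.Set.empty) ((l.filter (fun q => q.2 == c)).map (fun q => q.1)) := by
  induction l with
  | nil => intro d c; simp [PySem.Set.update]
  | cons q l ih =>
    intro d c
    rw [List.foldl_cons, ih]
    by_cases hc : q.2 = c
    · subst hc
      rw [PySem.Dict.getD_modify_self]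
      simp [PySem.Set.update]
    · rw [PySem.Dict.getD_modify_of_ne _ _ _ (Ne.symm hc)]
      simp [hc]

theorem pv_insertBy_congr {α : Type} (b1 b2 : α → α → Bool) (x : α) (ys : List α)
    (h : ∀ y ∈ ys, b1 x y = b2 x y) :
    PySem.List.insertBy b1 x ys = PySem.List.insertBy b2 x ys := by
  induction ys with
  | nil => rfl
  | cons y ys ih =>
    rw [PySem.List.insertBy.eq_2, PySem.List.insertBy.eq_2, h y (List.mem_cons_self),
      ih (fun z hz => h z (List.mem_cons_of_mem _ hz))]

theorem pv_foldl_insertBy_congr {α : Type} (b1 b2 : α → α → Bool) (L : List α)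
    (h : ∀ x ∈ L, ∀ y ∈ L, b1 x y = b2 x y) :
    ∀ (xs acc : List α), (∀ x ∈ xs, x ∈ L) → (∀ x ∈ acc, x ∈ L) →
      xs.foldl (fun acc x => PySem.List.insertBy b1 x acc) acc
      = xs.foldl (fun acc x => PySem.List.insertBy b2 x acc) acc := by
  intro xs
  induction xs with
  | nil => intro acc _ _; rfl
  | cons x xs ih =>
    intro acc hxs hacc
    have hx : x ∈ L := hxs x (List.mem_cons_self)
    have hstep : PySem.List.insertBy b1 x acc = PySem.List.insertBy b2 x acc :=
      pv_insertBy_congr b1 b2 x acc (fun y hy => h x hx y (hacc y hy))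
    rw [List.foldl_cons, List.foldl_cons, hstep]
    exact ih _ (fun z hz => hxs z (List.mem_cons_of_mem _ hz))
      (fun z hz => by
        rcases (PySem.List.mem_insertBy b2 x z acc).1 hz with h1 | h2
        · exact h1 ▸ hx
        · exact hacc z h2)

-- Python's tuple sort, on pairs with pairwise-distinct first components, is the sort by first component
theorem pv_sorted2_eq_sorted_fst (xs : List (String × List String))
    (h : (xs.map Prod.fst).Nodup) :
    PySem.List.sorted2 xs Prod.fst Prod.snd false = PySem.List.sorted xs Prod.fst false := by
  have hinj := List.inj_on_of_nodup_map h
  rw [PySem.List.sorted_eq_foldl_insertBy]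
  show xs.foldl (fun acc x => PySem.List.insertBy
      (fun a b => decide (a.1 < b.1) || (!decide (b.1 < a.1) && decide (a.2 < b.2))) x acc) []
    = _
  apply pv_foldl_insertBy_congr _ _ xs _ xs [] (fun _ hx => hx) (fun _ hx => (List.not_mem_nil hx).elim)
  intro a ha b hb
  by_cases hab : a.1 = b.1
  · have : a = b := hinj ha hb hab
    subst this
    simp
  · rcases lt_trichotomy a.1 b.1 with hlt | heq | hgt
    · simp [hlt]
    · exact absurd heq hab
    · simp [hgt, not_lt_of_gt hgt]

theorem pv_main (weblogs : List (String × String)) :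
    web_analyzer weblogs = web_analyzer_alt weblogs := by
  unfold web_analyzer web_analyzer_alt
  simp only [pv_body_eq]
  set D := weblogs.foldl (fun d log => d.modify log.2 PySem.Set.empty (fun s => PySem.Set.add s log.1)) PySem.Dict.empty with hD
  have hkeys : D.keys = PySem.Set.ofList (weblogs.map (fun l => l.2)) := by
    rw [hD, PySem.Dict.keys_foldl_modify_key weblogs (fun l => l.2) PySem.Set.empty
      (fun _ log => fun s => PySem.Set.add s log.1) PySem.Dict.empty]
    simp [PySem.Dict.empty, PySem.Dict.keys, PySem.Set.update_nil_left]
  have hnodup : D.keys.Nodup := by rw [hkeys]; exact PySem.Set.nodup_ofList _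
  have hgetD : ∀ c, D.getD c PySem.Set.empty
      = PySem.Set.ofList ((weblogs.filter (fun l => l.2 == c)).map (fun l => l.1)) := by
    intro c
    rw [hD, pv_getD_fold]
    simp [PySem.Dict.getD, PySem.Dict.get?, PySem.Dict.empty, PySem.Set.update_nil_left]
  rw [PySem.Dict.items_eq_map_keys D hnodup PySem.Set.empty, hkeys, List.map_map]
  set S := PySem.Set.ofList (weblogs.map (fun l => l.2)) with hS
  set f : String → String × List String := fun p =>
    (p, PySem.List.sorted
          (PySem.Set.ofList ((weblogs.filter (fun l => l.2 == p)).map (fun l => l.1)))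
          (fun x => x) false) with hf
  have hmapf : ((fun kv => (kv.1, PySem.List.sorted kv.2 (fun x => x) false)) ∘
      fun k => (k, D.getD k PySem.Set.empty)) = f := by
    funext k
    simp only [hf, Function.comp_apply]
    rw [hgetD k]
  rw [hmapf]
  have hnodupf : ((S.map f).map Prod.fst).Nodup := by
    rw [List.map_map]
    have : (Prod.fst ∘ f) = id := by funext k; simp [hf]
    rw [this, List.map_id]
    exact PySem.Set.nodup_ofList _
  rw [pv_sorted2_eq_sorted_fst _ hnodupf]
  apply PySem.List.sorted_eq_of_perm_of_pairwise_lt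
  · exact List.Perm.map f (PySem.List.sorted_perm _ _ _)
  · have hp : (PySem.List.sorted S (fun x => x) false).Pairwise (fun a b => a < b) := by
      rw [hS]; exact PySem.List.sorted_ofList_pairwise_lt _
    exact List.Pairwise.map f (fun a b hab => by simpa [hf] using hab) hp

-- ===== VERDICT (by name: the statement is the Claim_ definition above) =====
theorem web_analyzer_spec : Claim_equal_web_analyzer := by
  intro weblogs _
  unfold Spec_web_analyzer
  exact pv_main weblogs
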